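-- pv_equiv track=rewrite | github.com/ayoung0073/Algorithm | programmers/124나라의_숫자.py | solution
-- ===== SOURCE A (Python) =====
-- def solution(n):
--     answer = ''
--     q = n // 3
--     r = n % 3
--     while True:
--         if r == 0:
--             answer = '4' + answer
--             q -= 1
--         elif r == 1: answer = '1' + answer
--         elif r == 2: answer = '2' + answer
--
--         if q <= 0:
--             return answer
--
--         r = q % 3
--         q = q // 3
--
--     return answer
-- ===== SOURCE B (Python) =====
-- def solution(n):
--     q, r = divmod(n, 3)
--     if r == 0:
--         digit = '4'
--         q -= 1
--     elif r == 1: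
--         digit = '1'
--     else:
--         digit = '2'
--     if q <= 0:
--         return digit
--     return solution(q) + digit
-- ===== Notes on version B (the rewrite author's own statement) =====
-- stated objective: simpler
-- what changed: A's while-True loop with mutable quotient/remainder state and string prepending into an accumulator is replaced by a short direct recursion on the (possibly decremented) quotient that appends the current digit to the recursive result.
import Mathlib
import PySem

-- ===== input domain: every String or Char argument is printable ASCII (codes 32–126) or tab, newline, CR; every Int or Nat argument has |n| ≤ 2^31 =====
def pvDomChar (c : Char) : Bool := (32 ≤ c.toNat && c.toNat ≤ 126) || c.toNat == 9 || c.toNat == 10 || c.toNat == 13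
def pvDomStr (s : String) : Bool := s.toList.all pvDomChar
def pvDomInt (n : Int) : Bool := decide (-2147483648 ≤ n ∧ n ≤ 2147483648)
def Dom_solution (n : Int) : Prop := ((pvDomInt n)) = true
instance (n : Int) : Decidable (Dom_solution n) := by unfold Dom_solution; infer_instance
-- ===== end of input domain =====

-- B replaces A's while-loop with accumulator prepending by a direct recursion on the
-- quotient (simpler decomposition; same cost, same values on every Int).

-- ===== PORT A =====
-- A's 'while True' loop over state (q, r, answer); terminates because q strictly
-- decreases towards ≤ 0 (measure q.toNat).
def solutionLoop (q r : Int) (answer : String) : String :=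
  match _hqa : (if r = 0 then (q - 1, "4" ++ answer)
               else if r = 1 then (q, "1" ++ answer)
               else if r = 2 then (q, "2" ++ answer)
               else (q, answer) : Int × String) with
  | (q', answer') =>
    if q' ≤ 0 then answer'
    else solutionLoop (PySem.Int.floordiv q' 3) (PySem.Int.mod q' 3) answer'
termination_by q.toNat
decreasing_by
  simp only [PySem.Int.floordiv, Int.fdiv_eq_ediv]
  split_ifs at _hqa <;> simp_all <;> omega

def solution (n : Int) : String :=
  solutionLoop (PySem.Int.floordiv n 3) (PySem.Int.mod n 3) ""

-- ===== PORT B =====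
def solution_alt (n : Int) : String :=
  let q0 := PySem.Int.floordiv n 3
  let r := PySem.Int.mod n 3
  let qd : Int × String :=
    if r = 0 then (q0 - 1, "4")
    else if r = 1 then (q0, "1")
    else (q0, "2")
  if _h : qd.1 ≤ 0 then qd.2
  else solution_alt qd.1 ++ qd.2
termination_by n.toNat
decreasing_by
  simp only [PySem.Int.floordiv, PySem.Int.mod, q0, r, qd, Int.fdiv_eq_ediv] at *
  split_ifs at * <;> simp_all <;> omega

-- ===== PRECONDITION & SPEC =====
def Spec_solution (n : Int) (out : String) : Prop := out = solution_alt n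
instance (n : Int) (out : String) : Decidable (Spec_solution n out) := by unfold Spec_solution; infer_instance

-- ===== CLAIM (what is proved, stated in full; the proofs are below) =====
def Claim_equal_solution : Prop := ∀ (n : Int), Dom_solution n → Spec_solution n (solution n)

-- ===== LEMMAS AND PROOFS =====

-- one-step unfolding of A's loop, with the branch dispatch factored into (q', d)
theorem solutionLoop_unf (q r : Int) (s : String) :
    solutionLoop q r s =
      (if (if r = 0 then q - 1 else q) ≤ 0 then
        (if r = 0 then "4" else if r = 1 then "1" else if r = 2 then "2" else "") ++ s
      else solutionLoop (PySem.Int.floordiv (if r = 0 then q - 1 else q) 3)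
        (PySem.Int.mod (if r = 0 then q - 1 else q) 3)
        ((if r = 0 then "4" else if r = 1 then "1" else if r = 2 then "2" else "") ++ s)) := by
  rw [solutionLoop.eq_def]
  by_cases h0 : r = 0 <;> by_cases h1 : r = 1 <;> by_cases h2 : r = 2 <;> simp_all

-- the loop only ever prepends: the initial accumulator is a suffix that factors out
theorem solutionLoop_acc (k : Nat) : ∀ (q r : Int) (s : String), q.toNat ≤ k →
    solutionLoop q r s = solutionLoop q r "" ++ s := by
  induction k with
  | zero =>
    intro q r s hk
    rw [solutionLoop_unf q r s, solutionLoop_unf q r ""]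
    have h : (if r = 0 then q - 1 else q) ≤ 0 := by split_ifs <;> omega
    rw [if_pos h, if_pos h]
    simp
  | succ k ih =>
    intro q r s hk
    rw [solutionLoop_unf q r s, solutionLoop_unf q r ""]
    set q' := (if r = 0 then q - 1 else q) with hq'
    set d := (if r = 0 then "4" else if r = 1 then "1" else if r = 2 then "2" else "")
      with hd
    have hle : q' ≤ q := by rw [hq']; split_ifs <;> omega
    split_ifs with h
    · simp
    · rw [ih _ _ (d ++ s) ?_, ih _ _ (d ++ "") ?_]
      · simp [String.append_assoc]
      all_goals
        simp only [PySem.Int.floordiv, Int.fdiv_eq_ediv]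
        omega

theorem solution_alt_eq_loop (k : Nat) : ∀ (n : Int), n.toNat ≤ k →
    solution_alt n = solutionLoop (PySem.Int.floordiv n 3) (PySem.Int.mod n 3) "" := by
  induction k with
  | zero =>
    intro n hk
    have hq : PySem.Int.floordiv n 3 ≤ 0 := by
      simp only [PySem.Int.floordiv, Int.fdiv_eq_ediv]; omega
    rw [solution_alt.eq_def, solutionLoop_unf]
    have hr : PySem.Int.mod n 3 = 0 ∨ PySem.Int.mod n 3 = 1 ∨ PySem.Int.mod n 3 = 2 := by
      simp only [PySem.Int.mod, Int.fmod_eq_emod]; omega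
    rcases hr with h | h | h <;>
      simp only [h, reduceIte, one_ne_zero,
        show (2:Int) ≠ 0 by norm_num, show (2:Int) ≠ 1 by norm_num] <;>
      split_ifs with _hq2 <;> first | (exfalso; omega) | simp
  | succ k ih =>
    intro n hk
    have hr : PySem.Int.mod n 3 = 0 ∨ PySem.Int.mod n 3 = 1 ∨ PySem.Int.mod n 3 = 2 := by
      simp only [PySem.Int.mod, Int.fmod_eq_emod]; omega
    have hstep : ∀ q' : Int, 0 < q' → q' ≤ PySem.Int.floordiv n 3 →
        (PySem.Int.floordiv q' 3).toNat ≤ k ∧ q'.toNat ≤ k := by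
      intro q' h1 h2
      simp only [PySem.Int.floordiv, Int.fdiv_eq_ediv] at h2 ⊢
      omega
    rw [solution_alt.eq_def, solutionLoop_unf]
    rcases hr with h | h | h <;>
      simp only [h, reduceIte, one_ne_zero,
        show (2:Int) ≠ 0 by norm_num, show (2:Int) ≠ 1 by norm_num] <;>
      split_ifs with hq
    · simp
    · rw [ih _ ((hstep _ (by omega) (by omega)).2),
        solutionLoop_acc k _ _ ("4" ++ "") ((hstep _ (by omega) (by omega)).1)]
      simp
    · simp
    · rw [ih _ ((hstep _ (by omega) (by omega)).2),
        solutionLoop_acc k _ _ ("1" ++ "") ((hstep _ (by omega) (by omega)).1)]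
      simp
    · simp
    · rw [ih _ ((hstep _ (by omega) (by omega)).2),
        solutionLoop_acc k _ _ ("2" ++ "") ((hstep _ (by omega) (by omega)).1)]
      simp

-- ===== VERDICT (by name: the statement is the Claim_ definition above) =====
theorem solution_spec : Claim_equal_solution := by
  intro n _
  unfold Spec_solution solution
  rw [solution_alt_eq_loop n.toNat n (le_refl _)]
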